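-- pv_equiv track=rewrite | github.com/huluobohua/storm-loop | knowledge_storm/verify/memory.py | _classify_source
-- ===== SOURCE A (Python) =====
-- def _classify_source(source: str) -> str:
--     """Classify source type."""
--     if "arxiv" in source.lower():
--         return "preprint"
--     elif "doi.org" in source.lower():
--         return "academic"
--     elif any(domain in source.lower() for domain in [".edu", "scholar", "pubmed"]):
--         return "academic"
--     elif any(domain in source.lower() for domain in [".gov", ".org"]):
--         return "institutional"
--     else:
--         return "general"
-- ===== SOURCE B (Python) =====
-- PATTERNS = [("arxiv", 0), ("doi.org", 1), (".edu", 1), ("scholar", 1),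
--             ("pubmed", 1), (".gov", 2), (".org", 2)]
-- LABELS = ["preprint", "academic", "institutional", "general"]
--
--
-- def _classify_source(source: str) -> str:
--     """Classify source type."""
--     s = source.lower()
--     best = 3
--     for i in range(len(s)):
--         for pat, pr in PATTERNS:
--             if pr < best and s.startswith(pat, i):
--                 best = pr
--     return LABELS[best]
-- ===== Notes on version B (the rewrite author's own statement) =====
-- stated objective: alternative
-- what changed: Replaces the cascade of whole-string substring-containment tests with a single left-to-right sweep over the character positions of one lowercase copy, keeping the minimum priority of any pattern that starts at the current position and indexing a label table at the end; correct because the cascade returns the label of the lowest-priority pattern group occurring anywhere, which equals the minimum priority over all match positions.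
import Mathlib
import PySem

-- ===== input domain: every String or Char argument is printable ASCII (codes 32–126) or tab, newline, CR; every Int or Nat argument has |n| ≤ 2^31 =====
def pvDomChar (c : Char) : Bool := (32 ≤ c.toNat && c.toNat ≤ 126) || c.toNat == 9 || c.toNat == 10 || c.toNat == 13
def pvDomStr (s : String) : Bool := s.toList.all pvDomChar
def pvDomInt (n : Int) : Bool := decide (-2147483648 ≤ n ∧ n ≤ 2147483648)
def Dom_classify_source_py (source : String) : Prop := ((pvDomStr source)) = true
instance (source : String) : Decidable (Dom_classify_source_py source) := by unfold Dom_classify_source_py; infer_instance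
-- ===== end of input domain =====

-- B replaces A's cascade of whole-string containment tests by one position sweep over a single lowercase copy, keeping the minimum matched rule priority and indexing a label table (alternative algorithm, similar cost).


-- ===== PORT A =====
def classify_source_py (source : String) : String :=
  if PySem.Str.isIn "arxiv" (PySem.Str.lower source) then "preprint"
  else if PySem.Str.isIn "doi.org" (PySem.Str.lower source) then "academic"
  else if [".edu", "scholar", "pubmed"].any (fun d => PySem.Str.isIn d (PySem.Str.lower source)) then "academic"
  else if [".gov", ".org"].any (fun d => PySem.Str.isIn d (PySem.Str.lower source)) then "institutional"
  else "general"

-- ===== PORT B =====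
def pvPatterns : List (List Char × Nat) :=
  [("arxiv".toList, 0), ("doi.org".toList, 1), (".edu".toList, 1), ("scholar".toList, 1),
   ("pubmed".toList, 1), (".gov".toList, 2), (".org".toList, 2)]

def pvLabels : List String := ["preprint", "academic", "institutional", "general"]

-- s.startswith(pat, i) for 0 ≤ i is ported as pat.isPrefixOf (s.drop i): exact for the 0 ≤ i < len(s) range the loop produces
def classify_source_py_alt (source : String) : String :=
  let s := (PySem.Str.lower source).toList
  let best := (List.range s.length).foldl
    (fun b i => pvPatterns.foldl
      (fun b p => if p.2 < b ∧ p.1.isPrefixOf (s.drop i) then p.2 else b) b) 3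
  pvLabels.getD best "general"

-- ===== PRECONDITION & SPEC =====
def Spec_classify_source_py (source : String) (out : String) : Prop := out = classify_source_py_alt source
instance (source : String) (out : String) : Decidable (Spec_classify_source_py source out) := by unfold Spec_classify_source_py; infer_instance

-- ===== CLAIM (what is proved, stated in full; the proofs are below) =====
def Claim_equal_classify_source_py : Prop := ∀ (source : String), Dom_classify_source_py source → Spec_classify_source_py source (classify_source_py source)

-- ===== LEMMAS AND PROOFS =====

-- the sweep's step and the flattened (pattern, position) pair list, proof-side only
def pvSt (s : List Char) (b : Nat) (x : (List Char × Nat) × Nat) : Nat :=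
  if x.1.2 < b ∧ x.1.1.isPrefixOf (s.drop x.2) then x.1.2 else b

def pvLP (s : List Char) : List ((List Char × Nat) × Nat) :=
  (List.range s.length).flatMap fun i => pvPatterns.map fun p => (p, i)

lemma pv_alt_eq (source : String) :
    classify_source_py_alt source
      = pvLabels.getD ((pvLP (PySem.Chars.lower source.toList)).foldl
          (pvSt (PySem.Chars.lower source.toList)) 3) "general" := by
  unfold classify_source_py_alt pvLP pvSt
  simp [List.foldl_flatMap, List.foldl_map, PySem.Str.toList_lower]

lemma pvSt_le (s : List Char) (b : Nat) (x : (List Char × Nat) × Nat) : pvSt s b x ≤ b := by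
  unfold pvSt
  split_ifs with h
  · exact Nat.le_of_lt h.1
  · exact Nat.le_refl b

lemma pvSt_le_val (s : List Char) (b : Nat) (x : (List Char × Nat) × Nat)
    (hc : x.1.1.isPrefixOf (s.drop x.2) = true) : pvSt s b x ≤ x.1.2 := by
  unfold pvSt
  split_ifs with h
  · exact Nat.le_refl _
  · have : ¬ x.1.2 < b := fun hlt => h ⟨hlt, hc⟩
    omega

lemma pv_foldl_le (s : List Char) (L : List ((List Char × Nat) × Nat)) :
    ∀ b, L.foldl (pvSt s) b ≤ b := by
  induction L with
  | nil => intro b; exact Nat.le_refl b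
  | cons y L ih => intro b; exact Nat.le_trans (ih (pvSt s b y)) (pvSt_le s b y)

lemma pv_foldl_le_of_mem (s : List Char) (L : List ((List Char × Nat) × Nat))
    (x : (List Char × Nat) × Nat) (hx : x ∈ L)
    (hc : x.1.1.isPrefixOf (s.drop x.2) = true) :
    ∀ b, L.foldl (pvSt s) b ≤ x.1.2 := by
  induction L with
  | nil => cases hx
  | cons y L ih =>
    intro b
    rcases List.mem_cons.1 hx with rfl | hmem
    · exact Nat.le_trans (pv_foldl_le s L _) (pvSt_le_val s b x hc)
    · exact ih hmem (pvSt s b y)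

lemma pv_foldl_cases (s : List Char) (L : List ((List Char × Nat) × Nat)) :
    ∀ b, L.foldl (pvSt s) b = b ∨
      ∃ x ∈ L, x.1.1.isPrefixOf (s.drop x.2) = true ∧ L.foldl (pvSt s) b = x.1.2 := by
  induction L with
  | nil => intro b; exact Or.inl rfl
  | cons y L ih =>
    intro b
    have hy : pvSt s b y = b ∨ (y.1.1.isPrefixOf (s.drop y.2) = true ∧ pvSt s b y = y.1.2) := by
      unfold pvSt
      split_ifs with hif
      · exact Or.inr ⟨hif.2, rfl⟩
      · exact Or.inl rfl
    rcases ih (pvSt s b y) with h | ⟨x, hx, hc, hv⟩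
    · rcases hy with h2 | ⟨hc, h2⟩
      · left; show L.foldl (pvSt s) (pvSt s b y) = b; rw [h, h2]
      · right; exact ⟨y, by simp, hc, by show L.foldl (pvSt s) (pvSt s b y) = y.1.2; rw [h, h2]⟩
    · right; exact ⟨x, List.mem_cons_of_mem _ hx, hc, hv⟩

lemma pv_fst_mem (s : List Char) (x : (List Char × Nat) × Nat) (hx : x ∈ pvLP s) :
    x.1 ∈ pvPatterns := by
  simp only [pvLP, List.mem_flatMap, List.mem_map] at hx
  obtain ⟨i, _, p, hp, rfl⟩ := hx
  exact hp

lemma pv_cond_isIn (s : List Char) (x : (List Char × Nat) × Nat)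
    (hc : x.1.1.isPrefixOf (s.drop x.2) = true) :
    PySem.Chars.isIn x.1.1 s = true := by
  rw [← PySem.Chars.exists_prefix_drop_iff_isIn]
  exact ⟨x.2, List.isPrefixOf_iff_prefix.1 hc⟩

lemma pv_isIn_mem (s pat : List Char) (pr : Nat) (hp : (pat, pr) ∈ pvPatterns) (hne : pat ≠ [])
    (h : PySem.Chars.isIn pat s = true) :
    ∃ x ∈ pvLP s, x.1.1.isPrefixOf (s.drop x.2) = true ∧ x.1.2 = pr := by
  obtain ⟨j, hj⟩ := (PySem.Chars.exists_prefix_drop_iff_isIn pat s).2 h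
  have hjlt : j < s.length := by
    by_contra hge
    have : s.drop j = [] := List.drop_eq_nil_of_le (Nat.le_of_not_lt hge)
    rw [this] at hj
    exact hne (List.prefix_nil.1 hj)
  refine ⟨((pat, pr), j), ?_, List.isPrefixOf_iff_prefix.2 hj, rfl⟩
  simp only [pvLP, List.mem_flatMap, List.mem_map, List.mem_range]
  exact ⟨j, hjlt, (pat, pr), hp, rfl⟩

-- each matched (pattern, position) pair certifies one of A's containment conditions at its priority level
lemma pv_mem_val (s : List Char) (x : (List Char × Nat) × Nat) (hx : x ∈ pvLP s)
    (hc : x.1.1.isPrefixOf (s.drop x.2) = true) :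
    (x.1.2 = 0 ∧ PySem.Chars.isIn "arxiv".toList s = true)
    ∨ (x.1.2 = 1 ∧ (PySem.Chars.isIn "doi.org".toList s = true
        ∨ PySem.Chars.isIn ".edu".toList s = true
        ∨ PySem.Chars.isIn "scholar".toList s = true
        ∨ PySem.Chars.isIn "pubmed".toList s = true))
    ∨ (x.1.2 = 2 ∧ (PySem.Chars.isIn ".gov".toList s = true
        ∨ PySem.Chars.isIn ".org".toList s = true)) := by
  have h := pv_cond_isIn s x hc
  have hmem := pv_fst_mem s x hx
  simp only [pvPatterns, List.mem_cons, List.not_mem_nil, or_false] at hmem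
  rcases hmem with h1 | h1 | h1 | h1 | h1 | h1 | h1 <;> rw [h1] at h <;> rw [h1]
  · exact Or.inl ⟨rfl, h⟩
  · exact Or.inr (Or.inl ⟨rfl, Or.inl h⟩)
  · exact Or.inr (Or.inl ⟨rfl, Or.inr (Or.inl h)⟩)
  · exact Or.inr (Or.inl ⟨rfl, Or.inr (Or.inr (Or.inl h))⟩)
  · exact Or.inr (Or.inl ⟨rfl, Or.inr (Or.inr (Or.inr h))⟩)
  · exact Or.inr (Or.inr ⟨rfl, Or.inl h⟩)
  · exact Or.inr (Or.inr ⟨rfl, Or.inr h⟩)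

-- ===== VERDICT (by name: the statement is the Claim_ definition above) =====
theorem classify_source_py_spec : Claim_equal_classify_source_py := by
  intro source _
  unfold Spec_classify_source_py classify_source_py
  rw [pv_alt_eq]
  simp only [PySem.Str.isIn_eq, PySem.Str.toList_lower, List.any_cons, List.any_nil,
    Bool.or_false, Bool.or_eq_true]
  set s := PySem.Chars.lower source.toList with hs
  set r := (pvLP s).foldl (pvSt s) 3 with hr
  have hle3 : r ≤ 3 := pv_foldl_le s (pvLP s) 3
  by_cases h0 : PySem.Chars.isIn "arxiv".toList s = true
  · obtain ⟨x, hx, hc, hv⟩ := pv_isIn_mem s "arxiv".toList 0 (by simp [pvPatterns]) (by decide) h0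
    have hle0 : r ≤ 0 := hv ▸ pv_foldl_le_of_mem s (pvLP s) x hx hc 3
    have hr0 : r = 0 := Nat.le_zero.1 hle0
    rw [if_pos h0, hr0]
    rfl
  · rw [if_neg h0]
    by_cases h1 : PySem.Chars.isIn "doi.org".toList s = true
        ∨ PySem.Chars.isIn ".edu".toList s = true
        ∨ PySem.Chars.isIn "scholar".toList s = true
        ∨ PySem.Chars.isIn "pubmed".toList s = true
    · have hmat : ∃ x ∈ pvLP s, x.1.1.isPrefixOf (s.drop x.2) = true ∧ x.1.2 = 1 := by
        rcases h1 with h | h | h | h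
        · exact pv_isIn_mem s "doi.org".toList 1 (by simp [pvPatterns]) (by decide) h
        · exact pv_isIn_mem s ".edu".toList 1 (by simp [pvPatterns]) (by decide) h
        · exact pv_isIn_mem s "scholar".toList 1 (by simp [pvPatterns]) (by decide) h
        · exact pv_isIn_mem s "pubmed".toList 1 (by simp [pvPatterns]) (by decide) h
      obtain ⟨x, hx, hc, hv⟩ := hmat
      have hle1 : r ≤ 1 := hv ▸ pv_foldl_le_of_mem s (pvLP s) x hx hc 3
      have hne0 : r ≠ 0 := by
        intro hr0
        rcases pv_foldl_cases s (pvLP s) 3 with hcase | ⟨y, hy, hyc, hyv⟩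
        · rw [← hr] at hcase; omega
        · rw [← hr] at hyv
          rcases pv_mem_val s y hy hyc with ⟨hz, hcz⟩ | ⟨hz, _⟩ | ⟨hz, _⟩
          · exact h0 hcz
          all_goals omega
      have hr1 : r = 1 := by omega
      rw [hr1]
      have hrhs : pvLabels.getD 1 "general" = "academic" := rfl
      rw [hrhs]
      split_ifs with g1 g2 g3
      · rfl
      · rfl
      · exfalso
        rcases h1 with h | h | h | h
        · exact g1 h
        · exact g2 (Or.inl h)
        · exact g2 (Or.inr (Or.inl h))
        · exact g2 (Or.inr (Or.inr h))
      · exfalso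
        rcases h1 with h | h | h | h
        · exact g1 h
        · exact g2 (Or.inl h)
        · exact g2 (Or.inr (Or.inl h))
        · exact g2 (Or.inr (Or.inr h))
    · rw [not_or, not_or, not_or] at h1
      obtain ⟨h1a, h1b, h1c, h1d⟩ := h1
      by_cases h2 : PySem.Chars.isIn ".gov".toList s = true
          ∨ PySem.Chars.isIn ".org".toList s = true
      · have hmat : ∃ x ∈ pvLP s, x.1.1.isPrefixOf (s.drop x.2) = true ∧ x.1.2 = 2 := by
          rcases h2 with h | h
          · exact pv_isIn_mem s ".gov".toList 2 (by simp [pvPatterns]) (by decide) h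
          · exact pv_isIn_mem s ".org".toList 2 (by simp [pvPatterns]) (by decide) h
        obtain ⟨x, hx, hc, hv⟩ := hmat
        have hle2 : r ≤ 2 := hv ▸ pv_foldl_le_of_mem s (pvLP s) x hx hc 3
        have hne01 : ¬ (r = 0 ∨ r = 1) := by
          intro hr01
          rcases pv_foldl_cases s (pvLP s) 3 with hcase | ⟨y, hy, hyc, hyv⟩
          · rw [← hr] at hcase; omega
          · rw [← hr] at hyv
            rcases pv_mem_val s y hy hyc with ⟨hz, hcz⟩ | ⟨hz, hcz⟩ | ⟨hz, _⟩
            · exact h0 hcz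
            · rcases hcz with h | h | h | h
              · exact h1a h
              · exact h1b h
              · exact h1c h
              · exact h1d h
            · omega
        have hr2 : r = 2 := by omega
        rw [hr2]
        have hrhs : pvLabels.getD 2 "general" = "institutional" := rfl
        rw [hrhs]
        have hg2 : ¬ (PySem.Chars.isIn ".edu".toList s = true
            ∨ PySem.Chars.isIn "scholar".toList s = true
            ∨ PySem.Chars.isIn "pubmed".toList s = true) := by
          rintro (h | h | h)
          · exact h1b h
          · exact h1c h
          · exact h1d h
        rw [if_neg h1a, if_neg hg2, if_pos h2]
      · rw [not_or] at h2
        obtain ⟨h2a, h2b⟩ := h2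
        have hr3 : r = 3 := by
          rcases pv_foldl_cases s (pvLP s) 3 with hcase | ⟨y, hy, hyc, hyv⟩
          · rw [← hr] at hcase; exact hcase
          · exfalso
            rcases pv_mem_val s y hy hyc with ⟨_, hcz⟩ | ⟨_, hcz⟩ | ⟨_, hcz⟩
            · exact h0 hcz
            · rcases hcz with h | h | h | h
              · exact h1a h
              · exact h1b h
              · exact h1c h
              · exact h1d h
            · rcases hcz with h | h
              · exact h2a h
              · exact h2b h
        rw [hr3]
        have hrhs : pvLabels.getD 3 "general" = "general" := rfl
        rw [hrhs]
        have hg2 : ¬ (PySem.Chars.isIn ".edu".toList s = true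
            ∨ PySem.Chars.isIn "scholar".toList s = true
            ∨ PySem.Chars.isIn "pubmed".toList s = true) := by
          rintro (h | h | h)
          · exact h1b h
          · exact h1c h
          · exact h1d h
        have hg3 : ¬ (PySem.Chars.isIn ".gov".toList s = true
            ∨ PySem.Chars.isIn ".org".toList s = true) := by
          rintro (h | h)
          · exact h2a h
          · exact h2b h
        rw [if_neg h1a, if_neg hg2, if_neg hg3]
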